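-- pv_equiv track=rewrite | github.com/qualityashtrays/qwilsigilmill | sigil_serial.py | process_intent
-- ===== SOURCE A (Python) =====
-- LETTER_MAP = {
--     'A': 1, 'J': 1, 'S': 1,
--     'B': 2, 'K': 2, 'T': 2,
--     'C': 3, 'L': 3, 'U': 3,
--     'D': 4, 'M': 4, 'V': 4,
--     'E': 5, 'N': 5, 'W': 5,
--     'F': 6, 'O': 6, 'X': 6,
--     'G': 7, 'P': 7, 'Y': 7,
--     'H': 8, 'Q': 8, 'Z': 8,
--     'I': 9, 'R': 9
-- }
--
-- def process_intent(intent):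
--     """ Remove vowels and duplicate letters, then convert to numbers """
--     intent = intent.upper().replace(" ", "")
--     vowels = "AEIOU"
--     unique_letters = []
--
--     for letter in intent:
--         if letter not in vowels and letter not in unique_letters:
--             unique_letters.append(letter)
--
--     return [LETTER_MAP[letter] for letter in unique_letters if letter in LETTER_MAP]
-- ===== SOURCE B (Python) =====
-- def process_intent(intent):
--     """ Remove vowels and duplicate letters, then convert to numbers """
--     s = intent.upper().replace(" ", "")
--
--     def digits(chars):
--         if not chars:
--             return []
--         c = chars[0]
--         rest = [x for x in chars[1:] if x != c]
--         head = [(ord(c) - 65) % 9 + 1] if 'A' <= c <= 'Z' and c not in "AEIOU" else []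
--         return head + digits(rest)
--
--     return digits(list(s))
-- ===== Notes on version B (the rewrite author's own statement) =====
-- stated objective: alternative
-- what changed: Replaces A's seen-accumulator dedup loop plus LETTER_MAP lookup comprehension with a recursive head-and-filter decomposition (take the first char, filter all its later occurrences out of the rest, recurse) that emits each digit by the closed-form reduction (ord(c)-65)%9+1, so no seen container and no lookup table exist at all.
import Mathlib
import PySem

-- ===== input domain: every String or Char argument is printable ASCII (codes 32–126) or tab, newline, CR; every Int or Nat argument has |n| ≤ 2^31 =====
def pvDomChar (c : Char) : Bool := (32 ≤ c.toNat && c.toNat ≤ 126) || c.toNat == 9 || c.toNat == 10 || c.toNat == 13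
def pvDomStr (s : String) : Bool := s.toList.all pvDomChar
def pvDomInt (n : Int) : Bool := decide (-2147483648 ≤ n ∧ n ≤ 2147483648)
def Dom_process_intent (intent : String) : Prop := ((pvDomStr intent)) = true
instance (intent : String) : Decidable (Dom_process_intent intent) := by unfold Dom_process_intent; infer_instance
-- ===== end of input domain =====

-- B replaces A's seen-accumulator dedup loop and LETTER_MAP table with a recursive
-- head-and-filter decomposition (take the first char, filter its duplicates out of the
-- rest, recurse) emitting digits by the closed form (ord(c)-65)%9+1 (alternative).

-- ===== PORT A =====
-- LETTER_MAP
def letterMapA : PySem.Dict Char Int :=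
  PySem.Dict.ofList [('A',1),('J',1),('S',1),('B',2),('K',2),('T',2),('C',3),('L',3),('U',3),
    ('D',4),('M',4),('V',4),('E',5),('N',5),('W',5),('F',6),('O',6),('X',6),
    ('G',7),('P',7),('Y',7),('H',8),('Q',8),('Z',8),('I',9),('R',9)]

-- the for-loop building unique_letters ('letter in vowels' on the 1-char letter = char membership)
def uniqLoopA : List Char → List Char → List Char
  | [], acc => acc
  | c :: cs, acc =>
    if c ∉ "AEIOU".toList ∧ c ∉ acc then uniqLoopA cs (acc ++ [c])
    else uniqLoopA cs acc

def process_intent (intent : String) : List Int :=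
  let s := PySem.Str.replace (PySem.Str.upper intent) " " ""
  let uniq := uniqLoopA s.toList []
  -- [LETTER_MAP[l] for l in uniq if l in LETTER_MAP]
  uniq.filterMap (fun c => letterMapA.get? c)

-- ===== PORT B =====
-- Source B's recursive helper 'digits': head char, filter its duplicates from the rest, recurse;
-- emit the closed-form digit when the head is a non-vowel letter ('A' <= c <= 'Z' is codepoint order)
def digitsB : List Char → List Int
  | [] => []
  | c :: cs =>
    (if ('A' ≤ c ∧ c ≤ 'Z') ∧ c ∉ "AEIOU".toList then [((c.toNat : Int) - 65) % 9 + 1] else []) ++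
      digitsB (cs.filter (fun x => x != c))
termination_by cs => cs.length
decreasing_by
  have := List.length_filter_le (fun x => x != c) cs
  simp; omega

def process_intent_alt (intent : String) : List Int :=
  let s := PySem.Str.replace (PySem.Str.upper intent) " " ""
  digitsB s.toList

-- ===== PRECONDITION & SPEC =====
def Spec_process_intent (intent : String) (out : List Int) : Prop := out = process_intent_alt intent
instance (intent : String) (out : List Int) : Decidable (Spec_process_intent intent out) := by unfold Spec_process_intent; infer_instance

-- ===== CLAIM (what is proved, stated in full; the proofs are below) =====
def Claim_equal_process_intent : Prop := ∀ (intent : String), Dom_process_intent intent → Spec_process_intent intent (process_intent intent)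

-- ===== LEMMAS AND PROOFS =====

-- the digit B produces for a char, as a partial map
def gmap (c : Char) : Option Int :=
  if 'A' ≤ c ∧ c ≤ 'Z' then some (((c.toNat : Int) - 65) % 9 + 1) else none

theorem char_eq_iff_toNat (a b : Char) : a = b ↔ a.toNat = b.toNat :=
  ⟨fun h => by rw [h], fun h => Char.ext (UInt32.toNat_inj.mp h)⟩

theorem char_beq_toNat (a b : Char) : (a == b) = (a.toNat == b.toNat) := by
  by_cases h : a = b
  · subst h; simp
  · have h2 : a.toNat ≠ b.toNat := fun hn => h ((char_eq_iff_toNat a b).mpr hn)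
    simp [h, h2]

theorem char_le_iff_toNat (a b : Char) : a ≤ b ↔ a.toNat ≤ b.toNat := by
  rw [Char.le_def, UInt32.le_iff_toNat_le]; exact Iff.rfl

-- A's table agrees with B's closed-form digit on EVERY char
theorem letterMap_eq_gmap (c : Char) : letterMapA.get? c = gmap c := by
  have hm : letterMapA = PySem.Dict.mk [('A',1),('J',1),('S',1),('B',2),('K',2),('T',2),('C',3),('L',3),('U',3),
    ('D',4),('M',4),('V',4),('E',5),('N',5),('W',5),('F',6),('O',6),('X',6),
    ('G',7),('P',7),('Y',7),('H',8),('Q',8),('Z',8),('I',9),('R',9)] := by decide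
  rw [hm]
  simp only [PySem.Dict.get?_mk_cons, char_beq_toNat, gmap, char_le_iff_toNat]
  by_cases h : 65 ≤ c.toNat ∧ c.toNat ≤ 90
  · obtain ⟨h1, h2⟩ := h
    interval_cases h : c.toNat <;> simp_all
  · have h3 : ∀ k : Nat, 65 ≤ k → k ≤ 90 → ¬ (k = c.toNat) := by
      intro k hk1 hk2 he; omega
    simp [h, h3 65, h3 66, h3 67, h3 68, h3 69, h3 70, h3 71, h3 72, h3 73, h3 74, h3 75, h3 76,
      h3 77, h3 78, h3 79, h3 80, h3 81, h3 82, h3 83, h3 84, h3 85, h3 86, h3 87, h3 88, h3 89,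
      h3 90, PySem.Dict.get?]

-- the list of NEW chars A's dedup loop appends to acc, in order
def fresh : List Char → List Char → List Char
  | [], _ => []
  | c :: cs, acc => if c ∈ "AEIOU".toList ∨ c ∈ acc then fresh cs acc else c :: fresh cs (acc ++ [c])

theorem uniqLoopA_eq_fresh (cs : List Char) : ∀ acc, uniqLoopA cs acc = acc ++ fresh cs acc := by
  induction cs with
  | nil => intro acc; simp [uniqLoopA, fresh]
  | cons c cs ih =>
    intro acc
    by_cases h : c ∈ "AEIOU".toList ∨ c ∈ acc
    · have h' : ¬ (c ∉ "AEIOU".toList ∧ c ∉ acc) := by tauto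
      simp only [uniqLoopA, fresh]
      rw [if_neg h', if_pos h, ih]
    · have h' : c ∉ "AEIOU".toList ∧ c ∉ acc := by tauto
      simp only [uniqLoopA, fresh]
      rw [if_pos h', if_neg h, ih, List.append_assoc]
      rfl

-- A's dedup with the 'seen' accumulator replaced by a predicate (true = not yet seen)
def dedupP : List Char → (Char → Bool) → List Char
  | [], _ => []
  | c :: cs, P =>
    if c ∈ "AEIOU".toList ∨ P c = false then dedupP cs P
    else c :: dedupP cs (fun x => P x && (x != c))

theorem dedupP_congr (cs : List Char) : ∀ P Q : Char → Bool, (∀ x, P x = Q x) → dedupP cs P = dedupP cs Q := by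
  induction cs with
  | nil => intros; rfl
  | cons c cs ih =>
    intro P Q hPQ
    simp only [dedupP, hPQ c]
    split_ifs with h
    · exact ih P Q hPQ
    · exact congrArg (List.cons c)
        (ih (fun x => P x && (x != c)) (fun x => Q x && (x != c)) (fun x => by simp only [hPQ x]))

theorem fresh_eq_dedupP (cs : List Char) :
    ∀ (acc : List Char) (P : Char → Bool), (∀ x, P x = true ↔ x ∉ acc) →
      fresh cs acc = dedupP cs P := by
  induction cs with
  | nil => intros; rfl
  | cons c cs ih =>
    intro acc P hP
    have hPc : (P c = false) ↔ c ∈ acc := by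
      rw [← Bool.not_eq_true, hP c]; tauto
    by_cases h : c ∈ "AEIOU".toList ∨ c ∈ acc
    · have h' : c ∈ "AEIOU".toList ∨ P c = false := by rw [hPc]; exact h
      simp only [fresh, dedupP]
      rw [if_pos h, if_pos h', ih acc P hP]
    · have h' : ¬ (c ∈ "AEIOU".toList ∨ P c = false) := by rw [hPc]; exact h
      simp only [fresh, dedupP]
      rw [if_neg h, if_neg h']
      congr 1
      apply ih
      intro x
      rw [Bool.and_eq_true, hP x, bne_iff_ne]
      simp only [List.mem_append, List.mem_singleton]
      tauto

-- restricting the predicate by a vowel changes nothing (vowels are skipped anyway)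
theorem dedupP_vowel (v : Char) (hv : v ∈ "AEIOU".toList) (cs : List Char) :
    ∀ P : Char → Bool, dedupP cs (fun x => P x && (x != v)) = dedupP cs P := by
  induction cs with
  | nil => intros; rfl
  | cons c cs ih =>
    intro P
    by_cases hc : c = v
    · subst hc
      have h1 : c ∈ "AEIOU".toList ∨ (P c && (c != c)) = false := by simp
      have h2 : c ∈ "AEIOU".toList ∨ P c = false := Or.inl hv
      simp only [dedupP]
      rw [if_pos h1, if_pos h2, ih P]
    · have hne : (c != v) = true := by simp [hc]
      simp only [dedupP, hne, Bool.and_true]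
      split_ifs with h
      · exact ih P
      · rw [dedupP_congr cs _ (fun x => (P x && (x != c)) && (x != v))
            (fun x => by cases hx1 : P x <;> cases hx2 : x != c <;> cases hx3 : x != v <;>
              simp [hx1, hx2, hx3]),
          ih (fun x => P x && (x != c))]

-- B's recursion on the filtered list computes the digits of A's dedup output
theorem digitsB_filter_eq (n : Nat) : ∀ (cs : List Char), cs.length ≤ n → ∀ P : Char → Bool,
    digitsB (cs.filter P) = (dedupP cs P).filterMap gmap := by
  induction n with
  | zero =>
    intro cs hlen P
    have : cs = [] := List.eq_nil_of_length_eq_zero (Nat.le_zero.mp hlen)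
    subst this; simp [digitsB, dedupP]
  | succ n ih =>
    intro cs hlen P
    cases cs with
    | nil => simp [digitsB, dedupP]
    | cons c cs =>
      simp only [List.length_cons] at hlen
      by_cases hPc : P c = true
      · have hfilter : (c :: cs).filter P = c :: cs.filter P := by simp [List.filter, hPc]
        by_cases hvow : c ∈ "AEIOU".toList
        · -- head is a vowel: B emits nothing and filters its duplicates; A skips it
          have hemit : ¬ (('A' ≤ c ∧ c ≤ 'Z') ∧ c ∉ "AEIOU".toList) := fun h => h.2 hvow
          rw [hfilter]
          simp only [digitsB]
          rw [if_neg hemit, List.nil_append, List.filter_filter,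
            List.filter_congr (l := cs) (q := fun x => P x && (x != c))
              (fun x _ => by cases h1 : P x <;> cases h2 : x != c <;> simp [h1, h2]),
            ih cs (Nat.le_of_succ_le_succ hlen) (fun x => P x && (x != c)),
            dedupP_vowel c hvow cs P]
          have h2 : c ∈ "AEIOU".toList ∨ P c = false := Or.inl hvow
          simp only [dedupP]
          rw [if_pos h2]
        · -- head is new and not a vowel
          have h2 : ¬ (c ∈ "AEIOU".toList ∨ P c = false) := by
            rintro (h | h)
            · exact hvow h
            · rw [hPc] at h; simp at h
          rw [hfilter]
          simp only [digitsB, dedupP]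
          rw [if_neg h2, List.filter_filter,
            List.filter_congr (l := cs) (q := fun x => P x && (x != c))
              (fun x _ => by cases h1 : P x <;> cases h2 : x != c <;> simp [h1, h2]),
            ih cs (Nat.le_of_succ_le_succ hlen) (fun x => P x && (x != c))]
          have hg : gmap c = if ('A' ≤ c ∧ c ≤ 'Z') ∧ c ∉ "AEIOU".toList
              then some (((c.toNat : Int) - 65) % 9 + 1) else none := by
            simp only [gmap]
            by_cases hl : 'A' ≤ c ∧ c ≤ 'Z'
            · have hv' : ¬c = 'A' ∧ ¬c = 'E' ∧ ¬c = 'I' ∧ ¬c = 'O' ∧ ¬c = 'U' := by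
                simpa using hvow
              simp [hl, hv']
            · simp [hl]
          simp only [List.filterMap_cons, hg]
          split_ifs with hl
          · simp
          · simp
      · -- head already seen: both sides drop it
        have hPc' : P c = false := by revert hPc; cases P c <;> simp
        have hfilter : (c :: cs).filter P = cs.filter P := by simp [List.filter, hPc']
        have h2 : c ∈ "AEIOU".toList ∨ P c = false := Or.inr hPc'
        rw [hfilter, ih cs (Nat.le_of_succ_le_succ hlen) P]
        simp only [dedupP]
        rw [if_pos h2]

theorem process_intent_eq (intent : String) :
    process_intent intent = process_intent_alt intent := by
  show List.filterMap (fun c => letterMapA.get? c)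
      (uniqLoopA (PySem.Str.replace (PySem.Str.upper intent) " " "").toList [])
    = digitsB (PySem.Str.replace (PySem.Str.upper intent) " " "").toList
  set s := (PySem.Str.replace (PySem.Str.upper intent) " " "").toList with hs
  rw [uniqLoopA_eq_fresh, List.nil_append,
    fresh_eq_dedupP s [] (fun _ => true) (by simp),
    List.filterMap_congr (fun c _ => letterMap_eq_gmap c),
    ← digitsB_filter_eq s.length s (Nat.le_refl _) (fun _ => true)]
  simp

-- ===== VERDICT (by name: the statement is the Claim_ definition above) =====
theorem process_intent_spec : Claim_equal_process_intent := by
  intro intent _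
  unfold Spec_process_intent
  exact process_intent_eq intent
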